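-- pv_equiv track=rewrite | github.com/0515-Yoonseo-Kim/BAEKJOON | 프로그래머스/1/92334. 신고 결과 받기/신고 결과 받기.py | solution
-- ===== SOURCE A (Python) =====
-- def solution(id_list, report, k):
--
--     complaint = {user:set() for user in id_list}
--     mail = {user: 0 for user in id_list}
--
--     for r in report:
--         re,reported = r.split()
--         complaint[reported].add(re)
--
--
--     suspension = [key for key,val in complaint.items() if len(val)>=k]
--     for s in suspension:
--         temp_list = list(complaint[s])
--         for t in temp_list:
--             mail[t]+=1
--
--
--     result = list(mail.values())
--     return result
-- ===== SOURCE B (Python) =====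
-- def solution(id_list, report, k):
--     pairs = list(dict.fromkeys(tuple(r.split()) for r in report))
--     counts = {}
--     for _, rep in pairs:
--         counts[rep] = counts.get(rep, 0) + 1
--     suspended = {rep for rep, c in counts.items() if c >= k}
--     mail = {u: 0 for u in id_list}
--     for re, rep in pairs:
--         if rep in suspended:
--             mail[re] += 1
--     return [mail[u] for u in id_list]
-- ===== Notes on version B (the rewrite author's own statement) =====
-- stated objective: idiomatic
-- what changed: Replaces A's per-user reporter-set dict plus nested suspension/reporter loops by deduplicating the reports into a pair list once, counting distinct reporters per reported user, and doing a single pass over the deduplicated pairs with a membership test against the suspended set; output is rebuilt by a comprehension over id_list.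
-- outside the precondition, e.g. on solution(['a', 'a'], [], 1): A returns [0], B returns [0, 0]; on solution(['a', 'b'], ['x a'], 2): A returns [0, 0], B returns [0, 0]
import Mathlib
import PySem

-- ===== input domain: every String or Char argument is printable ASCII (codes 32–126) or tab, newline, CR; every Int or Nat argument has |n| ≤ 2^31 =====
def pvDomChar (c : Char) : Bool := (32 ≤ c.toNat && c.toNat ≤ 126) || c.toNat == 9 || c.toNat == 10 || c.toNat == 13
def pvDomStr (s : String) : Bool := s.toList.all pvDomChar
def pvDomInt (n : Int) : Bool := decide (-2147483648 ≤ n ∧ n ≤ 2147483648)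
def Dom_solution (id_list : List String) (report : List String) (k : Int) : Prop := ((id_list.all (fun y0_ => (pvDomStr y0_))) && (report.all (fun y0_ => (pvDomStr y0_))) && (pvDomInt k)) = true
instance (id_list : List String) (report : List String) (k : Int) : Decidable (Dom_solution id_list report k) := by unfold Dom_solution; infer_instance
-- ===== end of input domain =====

-- B replaces A's per-user reporter-set dict and nested suspension loops by a deduplicated
-- report-pair list, a reporter count per reported user, and one conditional pass (idiomatic).

-- ===== PORT A =====
-- A-side helper: the body of `for r in report: re, reported = r.split(); complaint[reported].add(re)`
def pvStepA (d : PySem.Dict String (PySem.Set String)) (r : String) :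
    PySem.Dict String (PySem.Set String) :=
  match PySem.Str.split₀ r with
  | [re, reported] => d.modify reported PySem.Set.empty (fun s => s.add re)
  | _ => d    -- Python raises ValueError here; excluded by Pre_

def solution (id_list : List String) (report : List String) (k : Int) : List Int :=
  -- complaint = {user: set() for user in id_list}; mail = {user: 0 for user in id_list}
  let complaint0 : PySem.Dict String (PySem.Set String) :=
    id_list.foldl (fun d user => d.insert user PySem.Set.empty) PySem.Dict.empty
  let mail : PySem.Dict String Int :=
    id_list.foldl (fun d user => d.insert user 0) PySem.Dict.empty
  -- for r in report: re, reported = r.split(); complaint[reported].add(re)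
  -- (modify is exact here: under Pre_ 'reported' is a key; Python raises KeyError/ValueError otherwise)
  let complaint : PySem.Dict String (PySem.Set String) :=
    report.foldl pvStepA complaint0
  -- suspension = [key for key, val in complaint.items() if len(val) >= k]
  let suspension : List String :=
    (complaint.items.filter (fun kv => decide (k ≤ PySem.Set.len kv.2))).map (fun kv => kv.1)
  -- for s in suspension: for t in list(complaint[s]): mail[t] += 1   (result is order-independent)
  let mail : PySem.Dict String Int :=
    suspension.foldl (fun m s =>
      (complaint.getD s PySem.Set.empty).foldl (fun m t => m.modify t 0 (· + 1)) m) mail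
  mail.values

-- ===== PORT B =====
-- B-side helper: `tuple(r.split())` as a pair (under Pre_ every split has exactly two tokens;
-- Python raises ValueError otherwise)
def pvPairB (r : String) : String × String :=
  match PySem.Str.split₀ r with
  | [a, b] => (a, b)
  | _ => ("", "")

def solution_alt (id_list : List String) (report : List String) (k : Int) : List Int :=
  -- pairs = list(dict.fromkeys(tuple(r.split()) for r in report))
  let pairs : List (String × String) :=
    PySem.List.dedup (report.map pvPairB)
  -- counts[rep] = counts.get(rep, 0) + 1 over pairs
  let counts : PySem.Dict String Int :=
    pairs.foldl (fun d p => d.insert p.2 (d.getD p.2 0 + 1)) PySem.Dict.empty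
  -- suspended = {rep for rep, c in counts.items() if c >= k}
  let suspended : PySem.Set String :=
    PySem.Set.ofList ((counts.items.filter (fun kv => decide (k ≤ kv.2))).map (fun kv => kv.1))
  -- mail = {u: 0 for u in id_list}; for re, rep in pairs: if rep in suspended: mail[re] += 1
  let mail0 : PySem.Dict String Int :=
    id_list.foldl (fun d u => d.insert u 0) PySem.Dict.empty
  let mail : PySem.Dict String Int :=
    pairs.foldl (fun m p => if suspended.contains p.2 then m.modify p.1 0 (· + 1) else m) mail0
  id_list.map (fun u => mail.getD u 0)

-- ===== PRECONDITION & SPEC =====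
-- Pre_ requires distinct ids and every report to be exactly two ids from id_list: elsewhere A
-- raises KeyError/ValueError (except that an unknown reporter whose target is never suspended
-- accidentally returns), and on duplicate ids the output length under A's dict-dedup is a
-- defensible corner no caller specifies (see the cited excluded examples).
def Pre_solution (id_list : List String) (report : List String) (k : Int) : Prop :=
  id_list.Nodup ∧
  (report.all (fun r =>
    match PySem.Str.split₀ r with
    | [a, b] => id_list.contains a && id_list.contains b
    | _ => false)) = true
instance (id_list : List String) (report : List String) (k : Int) : Decidable (Pre_solution id_list report k) := by unfold Pre_solution; infer_instance
def pvWitness_solution : List String × List String × Int :=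
  (["muzi", "frodo", "apeach"], ["muzi frodo", "apeach frodo", "frodo muzi", "muzi frodo"], 2)

def Spec_solution (id_list : List String) (report : List String) (k : Int) (out : List Int) : Prop := out = solution_alt id_list report k
instance (id_list : List String) (report : List String) (k : Int) (out : List Int) : Decidable (Spec_solution id_list report k out) := by unfold Spec_solution; infer_instance

-- ===== CLAIM (what is proved, stated in full; the proofs are below) =====
def Claim_equal_solution : Prop := ∀ (id_list : List String) (report : List String) (k : Int), Dom_solution id_list report k → Pre_solution id_list report k → Spec_solution id_list report k (solution id_list report k)

-- ===== LEMMAS AND PROOFS =====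

/-- The canonical common value of both ports at user u. -/
def pvCanon (report : List String) (k : Int) (u : String) : Int :=
  (((PySem.Set.ofList (report.map pvPairB)).countP
    (fun p => p.1 == u &&
      decide (k ≤ ((((PySem.Set.ofList (report.map pvPairB)).filter
        (fun q => q.2 == p.2)).length : Int))))) : Int)

theorem pvPre_parse {id_list report : List String} {k : Int}
    (h : Pre_solution id_list report k) :
    ∀ r ∈ report, PySem.Str.split₀ r = [(pvPairB r).1, (pvPairB r).2] ∧
      (pvPairB r).1 ∈ id_list ∧ (pvPairB r).2 ∈ id_list := by
  intro r hr
  have h2 := h.2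
  rw [List.all_eq_true] at h2
  have := h2 r hr
  unfold pvPairB
  rcases hs : PySem.Str.split₀ r with _ | ⟨a, _ | ⟨b, _ | ⟨c, t⟩⟩⟩ <;>
    simp [hs] at this ⊢ <;>
    simp_all [List.contains_eq_mem]

theorem pvMem_parse {id_list report : List String} {k : Int}
    (h : Pre_solution id_list report k) :
    ∀ p ∈ report.map pvPairB, p.1 ∈ id_list ∧ p.2 ∈ id_list := by
  intro p hp
  rcases List.mem_map.mp hp with ⟨r, hr, rfl⟩
  exact ⟨(pvPre_parse h r hr).2.1, (pvPre_parse h r hr).2.2⟩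

/-- getD of the 'insert a constant value for every listed key' initialisation. -/
theorem pvGetD_initConst {ν : Type} (xs : List String) (c : ν) (d : PySem.Dict String ν)
    (u : String) (h : d.getD u c = c) :
    (xs.foldl (fun d x => d.insert x c) d).getD u c = c := by
  induction xs generalizing d with
  | nil => exact h
  | cons x xs ih =>
    simp only [List.foldl_cons]
    exact ih _ (by rw [PySem.Dict.getD_insert]; split <;> simp [h])

/-- getD through the grouping loop `complaint[p.2].add(p.1)`. -/
theorem pvGetD_groupFold (l : List (String × String)) (d : PySem.Dict String (PySem.Set String))
    (u : String) :
    (l.foldl (fun d p => d.modify p.2 PySem.Set.empty (fun s => s.add p.1)) d).getD u PySem.Set.empty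
      = (l.filter (fun p => p.2 == u)).foldl (fun s p => s.add p.1) (d.getD u PySem.Set.empty) := by
  induction l generalizing d with
  | nil => rfl
  | cons p l ih =>
    simp only [List.foldl_cons, List.filter_cons]
    rw [ih]
    by_cases hpu : p.2 = u
    · simp [hpu, PySem.Dict.getD_modify]
    · simp [hpu, PySem.Dict.getD_modify, Ne.symm hpu, beq_iff_eq]

/-- getD through B's conditional counting pass. -/
theorem pvGetD_condFold (c : String × String → Bool) (l : List (String × String))
    (m : PySem.Dict String Int) (u : String) :
    (l.foldl (fun m p => if c p then m.modify p.1 0 (· + 1) else m) m).getD u 0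
      = m.getD u 0 + (((l.filter c).map (fun p => p.1)).count u : Int) := by
  induction l generalizing m with
  | nil => simp
  | cons p l ih =>
    simp only [List.foldl_cons, List.filter_cons]
    by_cases hc : c p
    · simp only [hc, if_true]
      rw [ih]
      rw [PySem.Dict.getD_modify]
      by_cases hu : u = p.1 <;>
        simp [hu, Ne.symm, List.count_cons] <;> omega
    · simp only [hc, if_false, Bool.false_eq_true]
      rw [ih]

/-- getD through B's reporter-count loop. -/
theorem pvGetD_countFold (l : List (String × String)) (d : PySem.Dict String Int) (s : String) :
    (l.foldl (fun d p => d.insert p.2 (d.getD p.2 0 + 1)) d).getD s 0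
      = d.getD s 0 + ((l.map (fun p => p.2)).count s : Int) := by
  induction l generalizing d with
  | nil => simp
  | cons p l ih =>
    simp only [List.foldl_cons, List.map_cons]
    rw [ih, PySem.Dict.getD_insert]
    by_cases hs : s = p.2 <;> simp [hs, Ne.symm, List.count_cons] <;> omega

/-- getD through A's nested suspension loop. -/
theorem pvGetD_outerFold (C : String → PySem.Set String) (susp : List String)
    (m : PySem.Dict String Int) (u : String) :
    (susp.foldl (fun m s => (C s).foldl (fun m t => m.modify t 0 (· + 1)) m) m).getD u 0
      = m.getD u 0 + (susp.map (fun s => (((C s).count u : Int)))).sum := by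
  induction susp generalizing m with
  | nil => simp
  | cons s susp ih =>
    simp only [List.foldl_cons, List.map_cons, List.sum_cons]
    rw [ih, PySem.Dict.getD_foldl_modify_add_one]
    ring

theorem pvSet_update_of_mem (s : PySem.Set String) (xs : List String)
    (h : ∀ x ∈ xs, x ∈ s) : s.update xs = s := by
  induction xs generalizing s with
  | nil => rfl
  | cons x xs ih =>
    have hx : s.add x = s := by
      unfold PySem.Set.add
      simp [h x (by simp)]
    show PySem.Set.update s (x :: xs) = s
    unfold PySem.Set.update
    simp only [List.foldl_cons]
    rw [show s.add x = s from hx]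
    exact ih s (fun y hy => h y (by simp [hy]))

/-- A's nested mail loop does not change the key list when every reporter is already a key. -/
theorem pvKeys_outerFold (C : String → PySem.Set String) (susp : List String)
    (m : PySem.Dict String Int) (h : ∀ s ∈ susp, ∀ t ∈ C s, t ∈ m.keys) :
    (susp.foldl (fun m s => (C s).foldl (fun m t => m.modify t 0 (· + 1)) m) m).keys = m.keys := by
  induction susp generalizing m with
  | nil => rfl
  | cons s susp ih =>
    simp only [List.foldl_cons]
    have hk : ((C s).foldl (fun m t => m.modify t 0 (· + 1)) m).keys = m.keys := by
      rw [PySem.Dict.keys_foldl_modify]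
      exact pvSet_update_of_mem _ _ (h s (by simp))
    rw [ih, hk]
    intro s' hs' t ht
    rw [hk]
    exact h s' (by simp [hs']) t ht

theorem pvCountP_or {α : Type} (l : List α) (f g : α → Bool)
    (h : ∀ x ∈ l, ¬(f x = true ∧ g x = true)) :
    l.countP (fun x => f x || g x) = l.countP f + l.countP g := by
  induction l with
  | nil => simp
  | cons x l ih =>
    have hx := h x (by simp)
    simp only [List.countP_cons]
    rw [ih (fun y hy => h y (by simp [hy]))]
    by_cases hf : f x <;> by_cases hg : g x <;> simp [hf, hg] at hx ⊢ <;> omega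

/-- Sum over a nodup suspension list of per-pair indicators = one filtered count over the pairs. -/
theorem pvCount_split (u : String) (S : List String) (hS : S.Nodup)
    (P : List (String × String)) (hP : P.Nodup) :
    (S.map (fun s => ((if (u, s) ∈ P then 1 else 0) : Int))).sum
      = (P.countP (fun p => p.1 == u && decide (p.2 ∈ S)) : Int) := by
  induction S with
  | nil => simp
  | cons s S ih =>
    rcases List.nodup_cons.mp hS with ⟨hsS, hS'⟩
    simp only [List.map_cons, List.sum_cons]
    rw [ih hS']
    have hsplit : P.countP (fun p => p.1 == u && decide (p.2 ∈ s :: S))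
        = P.countP (fun p => p.1 == u && p.2 == s) + P.countP (fun p => p.1 == u && decide (p.2 ∈ S)) := by
      rw [← pvCountP_or P (fun p => p.1 == u && p.2 == s) (fun p => p.1 == u && decide (p.2 ∈ S))
        (by intro p _ ⟨h1, h2⟩
            simp only [Bool.and_eq_true, beq_iff_eq, decide_eq_true_eq] at h1 h2
            exact hsS (h1.2 ▸ h2.2))]
      apply List.countP_congr
      intro p _
      by_cases h1 : p.1 = u <;> by_cases h2 : p.2 = s <;> by_cases h3 : p.2 ∈ S <;>
        simp [h1, h2, h3]
    rw [hsplit]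
    have hcnt : P.countP (fun p => p.1 == u && p.2 == s) = if (u, s) ∈ P then 1 else 0 := by
      have : P.countP (fun p => p.1 == u && p.2 == s) = P.count (u, s) := by
        apply List.countP_congr
        intro p _
        by_cases h1 : p.1 = u <;> by_cases h2 : p.2 = s <;>
          simp [h1, h2, Prod.ext_iff]
      rw [this]
      split
      · exact List.count_eq_one_of_mem hP (by assumption)
      · exact List.count_eq_zero_of_not_mem (by assumption)
    rw [hcnt]
    push_cast
    split <;> ring

/-- Distinct reporters of s among the raw pairs = pairs with second component s among the deduped pairs. -/
theorem pvLen_reporters (π : List (String × String)) (s : String) :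
    (PySem.Set.ofList ((π.filter (fun p => p.2 == s)).map (fun p => p.1))).length
      = ((PySem.Set.ofList π).filter (fun p => p.2 == s)).length := by
  have hR : ((PySem.Set.ofList π).filter (fun p => p.2 == s)).Nodup :=
    (PySem.Set.nodup_ofList π).filter _
  have hmap : (((PySem.Set.ofList π).filter (fun p => p.2 == s)).map (fun p => p.1)).Nodup := by
    apply List.Nodup.map_on _ hR
    intro a ha b hb hab
    have ha2 : a.2 = s := by simpa using (List.mem_filter.mp ha).2
    have hb2 : b.2 = s := by simpa using (List.mem_filter.mp hb).2
    exact Prod.ext hab (ha2.trans hb2.symm)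
  have hperm : List.Perm (PySem.Set.ofList ((π.filter (fun p => p.2 == s)).map (fun p => p.1)))
      (((PySem.Set.ofList π).filter (fun p => p.2 == s)).map (fun p => p.1)) := by
    rw [List.perm_ext_iff_of_nodup (PySem.Set.nodup_ofList _) hmap]
    intro x
    simp [PySem.Set.mem_ofList, List.mem_map, List.mem_filter, beq_iff_eq]
  rw [hperm.length_eq, List.length_map]

/-- Port B evaluates to the canonical count at every user (no precondition needed). -/
theorem pvB_eval (id_list report : List String) (k : Int) :
    solution_alt id_list report k = id_list.map (pvCanon report k) := by
  have hpairs : PySem.List.dedup (report.map pvPairB) = PySem.Set.ofList (report.map pvPairB) :=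
    PySem.List.dedup_eq_ofList _
  simp only [solution_alt]
  rw [hpairs]
  set π := report.map pvPairB with hπ
  set P := PySem.Set.ofList π with hP
  set counts : PySem.Dict String Int := P.foldl (fun d p => d.insert p.2 (d.getD p.2 0 + 1)) PySem.Dict.empty with hcounts
  -- value and keys of counts
  have hcget : ∀ s, counts.getD s 0 = ((P.map (fun p => p.2)).count s : Int) := by
    intro s; rw [hcounts, pvGetD_countFold]; simp
  have hckeys : counts.keys = PySem.Set.ofList (P.map (fun p => p.2)) := by
    rw [hcounts, PySem.Dict.keys_foldl_insert_key P (fun p => p.2) (fun d p => d.getD p.2 0 + 1)]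
    simp [PySem.Dict.keys_empty, PySem.Set.update_nil_left]
  have hcnd : counts.keys.Nodup := by rw [hckeys]; exact PySem.Set.nodup_ofList _
  set suspended : PySem.Set String := PySem.Set.ofList
    ((counts.items.filter (fun kv => decide (k ≤ kv.2))).map (fun kv => kv.1)) with hsusp
  -- membership in suspended
  have hmem_susp : ∀ x, suspended.contains x = true ↔
      (x ∈ P.map (fun p => p.2) ∧ k ≤ (((P.filter (fun q => q.2 == x)).length : Int))) := by
    intro x
    rw [hsusp, PySem.Set.contains_iff, PySem.Set.mem_ofList]
    rw [PySem.Dict.items_eq_map_keys counts hcnd 0, List.filter_map, List.map_map]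
    simp only [List.mem_map, Function.comp, List.mem_filter, decide_eq_true_eq]
    constructor
    · rintro ⟨s, ⟨hs, hks⟩, rfl⟩
      rw [hckeys, PySem.Set.mem_ofList] at hs
      rw [hcget] at hks
      refine ⟨by simpa using hs, ?_⟩
      rwa [List.count_eq_countP, List.countP_map, List.countP_eq_length_filter] at hks
    · rintro ⟨hx, hkx⟩
      refine ⟨x, ⟨by rw [hckeys, PySem.Set.mem_ofList]; simpa using hx, ?_⟩, rfl⟩
      rw [hcget, List.count_eq_countP, List.countP_map, List.countP_eq_length_filter]
      exact hkx
  -- initial mail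
  have hmail0 : ∀ u, (id_list.foldl (fun d u => d.insert u (0 : Int)) PySem.Dict.empty).getD u 0 = 0 :=
    fun u => pvGetD_initConst id_list 0 PySem.Dict.empty u (PySem.Dict.getD_empty u 0)
  -- final mail values
  apply List.map_congr_left
  intro u _
  rw [pvGetD_condFold, hmail0, zero_add]
  unfold pvCanon
  rw [← hπ, ← hP]
  rw [List.count_eq_countP, List.countP_map, List.countP_filter]
  congr 1
  apply List.countP_congr
  intro p hp
  have hc : PySem.Set.contains suspended p.2
      = decide (k ≤ (((P.filter (fun q => q.2 == p.2)).length : Int))) := by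
    have h2 : p.2 ∈ P.map (fun p => p.2) := List.mem_map.mpr ⟨p, hp, rfl⟩
    by_cases hk : k ≤ (((P.filter (fun q => q.2 == p.2)).length : Int))
    · simp only [hk, decide_true]
      exact (hmem_susp p.2).mpr ⟨h2, hk⟩
    · simp only [hk, decide_false]
      by_contra hcon
      simp only [Bool.not_eq_false] at hcon
      exact hk ((hmem_susp p.2).mp hcon).2
  rw [hc]
  simp [Function.comp]

/-- Port A evaluates to the canonical count at every user. -/
theorem pvA_eval (id_list report : List String) (k : Int)
    (hPre : Pre_solution id_list report k) :
    solution id_list report k = id_list.map (pvCanon report k) := by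
  have hNd := hPre.1
  have hparse := pvPre_parse hPre
  have hπmem := pvMem_parse hPre
  simp only [solution]
  set π := report.map pvPairB with hπ
  have hloop : (report.foldl pvStepA
        (id_list.foldl (fun d user => d.insert user PySem.Set.empty) PySem.Dict.empty))
      = π.foldl (fun d p => d.modify p.2 PySem.Set.empty (fun s => s.add p.1))
          (id_list.foldl (fun d user => d.insert user PySem.Set.empty) PySem.Dict.empty) := by
    rw [hπ, List.foldl_map]
    apply PySem.List.foldl_congr_mem
    intro d r hr
    unfold pvStepA
    rw [(hparse r hr).1]
  rw [hloop]
  set complaint : PySem.Dict String (PySem.Set String) :=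
    π.foldl (fun d p => d.modify p.2 PySem.Set.empty (fun s => s.add p.1))
      (id_list.foldl (fun d user => d.insert user PySem.Set.empty) PySem.Dict.empty) with hcompl
  have hemp : (PySem.Set.empty : PySem.Set String) = [] := rfl
  have hC : ∀ u, complaint.getD u PySem.Set.empty
      = PySem.Set.ofList ((π.filter (fun p => p.2 == u)).map (fun p => p.1)) := by
    intro u
    rw [hcompl, pvGetD_groupFold, pvGetD_initConst id_list PySem.Set.empty PySem.Dict.empty u
      (PySem.Dict.getD_empty u PySem.Set.empty)]
    rw [hemp, ← PySem.Set.update_map_eq_foldl_add, PySem.Set.update_nil_left]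
  have hkeys0 : ((id_list.foldl (fun d user => d.insert user PySem.Set.empty) PySem.Dict.empty :
      PySem.Dict String (PySem.Set String))).keys = id_list := by
    rw [PySem.Dict.keys_foldl_insert id_list
        (fun (_ : PySem.Dict String (PySem.Set String)) (_ : String) => PySem.Set.empty)
        PySem.Dict.empty,
      PySem.Dict.keys_empty, PySem.Set.update_nil_left]
    exact PySem.Set.ofList_eq_self_of_nodup id_list hNd
  have hkeysC : complaint.keys = id_list := by
    rw [hcompl, PySem.Dict.keys_foldl_modify_key π (fun p => p.2) PySem.Set.empty
      (fun d p => fun s => s.add p.1), hkeys0]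
    exact pvSet_update_of_mem id_list (π.map fun p => p.2) (by
      intro x hx
      rcases List.mem_map.mp hx with ⟨p, hp, rfl⟩
      exact (hπmem p hp).2)
  have hndC : complaint.keys.Nodup := by rw [hkeysC]; exact hNd
  have hsusp : (complaint.items.filter (fun kv => decide (k ≤ PySem.Set.len kv.2))).map (fun kv => kv.1)
      = id_list.filter (fun u => decide (k ≤ PySem.Set.len (complaint.getD u PySem.Set.empty))) := by
    rw [PySem.Dict.items_eq_map_keys complaint hndC PySem.Set.empty, hkeysC,
      List.filter_map, List.map_map]
    simp only [Function.comp_def]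
    exact List.map_id' _
  rw [hsusp]
  set SA := id_list.filter (fun u => decide (k ≤ PySem.Set.len (complaint.getD u PySem.Set.empty))) with hSA
  set mail0 : PySem.Dict String Int :=
    id_list.foldl (fun d user => d.insert user 0) PySem.Dict.empty with hm0
  have hkeysM0 : mail0.keys = id_list := by
    rw [hm0, PySem.Dict.keys_foldl_insert id_list (fun _ _ => (0 : Int)) PySem.Dict.empty,
      PySem.Dict.keys_empty, PySem.Set.update_nil_left]
    exact PySem.Set.ofList_eq_self_of_nodup id_list hNd
  have hmemCsub : ∀ s ∈ SA, ∀ t ∈ complaint.getD s PySem.Set.empty, t ∈ mail0.keys := by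
    intro s _ t ht
    rw [hkeysM0]
    rw [hC s, PySem.Set.mem_ofList] at ht
    rcases List.mem_map.mp ht with ⟨p, hp, rfl⟩
    exact (hπmem p (List.mem_of_mem_filter hp)).1
  have hkeysF : (SA.foldl (fun m s =>
      (complaint.getD s PySem.Set.empty).foldl (fun m t => m.modify t 0 (· + 1)) m) mail0).keys
      = id_list := by
    rw [pvKeys_outerFold _ _ _ hmemCsub, hkeysM0]
  have hndF : (SA.foldl (fun m s =>
      (complaint.getD s PySem.Set.empty).foldl (fun m t => m.modify t 0 (· + 1)) m) mail0).keys.Nodup := by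
    rw [hkeysF]; exact hNd
  rw [PySem.Dict.values_eq_map_keys _ hndF 0, hkeysF]
  apply List.map_congr_left
  intro u hu
  rw [pvGetD_outerFold]
  rw [hm0, pvGetD_initConst id_list 0 PySem.Dict.empty u (PySem.Dict.getD_empty u 0), zero_add]
  have hcount : ∀ s, (((complaint.getD s PySem.Set.empty).count u : Int))
      = ((if (u, s) ∈ PySem.Set.ofList π then 1 else 0) : Int) := by
    intro s
    rw [hC s]
    by_cases hm : u ∈ PySem.Set.ofList ((π.filter (fun p => p.2 == s)).map (fun p => p.1))
    · have h1 : (u, s) ∈ PySem.Set.ofList π := by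
        rw [PySem.Set.mem_ofList] at hm ⊢
        rcases List.mem_map.mp hm with ⟨p, hp, rfl⟩
        rcases List.mem_filter.mp hp with ⟨hpπ, hp2⟩
        have h2 : p.2 = s := by simpa using hp2
        have h3 : (p.1, s) = p := by rw [← h2]
        exact h3 ▸ hpπ
      rw [List.count_eq_one_of_mem (PySem.Set.nodup_ofList _) hm]
      simp [h1]
    · have h1 : (u, s) ∉ PySem.Set.ofList π := by
        intro hin
        apply hm
        rw [PySem.Set.mem_ofList] at hin ⊢
        exact List.mem_map.mpr ⟨(u, s), List.mem_filter.mpr ⟨hin, by simp⟩, rfl⟩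
      rw [List.count_eq_zero_of_not_mem hm]
      simp [h1]
  rw [List.map_congr_left (fun s _ => hcount s)]
  rw [pvCount_split u SA (hNd.filter _) (PySem.Set.ofList π) (PySem.Set.nodup_ofList π)]
  unfold pvCanon
  rw [← hπ]
  congr 1
  apply List.countP_congr
  intro p hp
  have hpπ : p ∈ π := (PySem.Set.mem_ofList π p).mp hp
  have hp2 : p.2 ∈ id_list := (hπmem p hpπ).2
  have hlen : PySem.Set.len (complaint.getD p.2 PySem.Set.empty)
      = (((PySem.Set.ofList π).filter (fun q => q.2 == p.2)).length : Int) := by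
    rw [hC p.2]
    simp [PySem.Set.len, pvLen_reporters]
  have hmemSA : p.2 ∈ SA ↔ k ≤ (((PySem.Set.ofList π).filter (fun q => q.2 == p.2)).length : Int) := by
    rw [hSA, List.mem_filter]
    simp only [hp2, true_and, decide_eq_true_eq]
    rw [hlen]
  by_cases hk : k ≤ (((PySem.Set.ofList π).filter (fun q => q.2 == p.2)).length : Int) <;>
    simp [hk, hmemSA]

-- ===== VERDICT (by name: the statement is the Claim_ definition above) =====
theorem solution_spec : Claim_equal_solution := by
  intro id_list report k _ hPre
  unfold Spec_solution
  rw [pvA_eval id_list report k hPre, pvB_eval id_list report k]
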